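-- pv_equiv track=rewrite | github.com/jskim7018/leetcode_study | algorithm_study/2026/02/20260206/medium/LC_1366.py | rankTeams
-- ===== SOURCE A (Python) =====
-- from typing import List
-- from collections import defaultdict
--
-- def rankTeams(votes: List[str]) -> str:
--     m, n = len(votes), len(votes[0])
--     counter = defaultdict(list)
--     cands = set()
--     for v in votes:
--         for c in v:
--             cands.add(c)
--     for j in range(n):
--         curr_counter = defaultdict(int)
--         for i in range(m):
--             curr_counter[votes[i][j]] += 1
--
--         for a in cands:
--             counter[a].append(curr_counter[a])
--
--     sort_votes = []
--     for k, v in counter.items():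
--         sort_votes.append(v + [k])
--     sort_votes.sort(key=lambda x: ([-a for a in x[:-1]], x[-1]))
--
--     return ''.join([x[-1] for x in sort_votes])
-- ===== SOURCE B (Python) =====
-- from typing import List
--
-- def rankTeams(votes: List[str]) -> str:
--     n = len(votes[0])
--     teams = {v[j] for v in votes for j in range(n)}
--     def score(t):
--         return [-sum(v[j] == t for v in votes) for j in range(n)]
--     return ''.join(sorted(teams, key=lambda t: (score(t), t)))
-- ===== Notes on version B (the rewrite author's own statement) =====
-- stated objective: simpler
-- what changed: B drops A's dictionaries entirely (the per-column temp counter, the accumulated count-list dict and the packed count+name rows): it builds the team set from the ranked columns once and sorts the team characters directly with a key that recomputes each team's per-position vote counts by a direct sum over the votes.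
-- outside the precondition, e.g. on rankTeams(['a', 'bc']): A returns 'abc', B returns 'ab'
import Mathlib
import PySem

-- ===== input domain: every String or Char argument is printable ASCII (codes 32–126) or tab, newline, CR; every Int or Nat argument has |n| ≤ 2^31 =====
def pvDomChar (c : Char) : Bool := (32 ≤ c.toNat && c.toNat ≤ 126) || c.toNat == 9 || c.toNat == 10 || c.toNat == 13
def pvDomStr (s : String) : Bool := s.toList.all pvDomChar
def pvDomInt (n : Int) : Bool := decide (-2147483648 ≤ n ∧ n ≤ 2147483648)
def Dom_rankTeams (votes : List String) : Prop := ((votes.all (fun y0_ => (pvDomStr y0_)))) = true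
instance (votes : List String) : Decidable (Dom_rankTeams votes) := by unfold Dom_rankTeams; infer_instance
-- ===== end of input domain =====

-- B replaces A's three dictionaries (per-column temp counter, accumulated count-list dict, packed
-- count+name rows) by sorting the team characters directly with a key that recomputes the per-position
-- counts as sums over the votes, with the team set read off the ranked columns; objective: simpler. Equivalence is on the RETURN value.
-- A iterates Python sets in hash order; since the final sort's key is injective (it contains the team
-- name) the returned string does not depend on that order, and the ports iterate in insertion order.

-- ===== PORT A =====
-- cands = set of all characters appearing in any vote
def rankTeamsCands (votes : List String) : PySem.Set Char :=
  votes.foldl (fun s v => v.toList.foldl PySem.Set.add s) PySem.Set.empty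

-- curr_counter for column j: for i in range(m): curr_counter[votes[i][j]] += 1
def rankTeamsCurr (votes : List String) (m : Nat) (j : Int) : PySem.Dict Char Int :=
  (PySem.List.pyRange 0 (m : Int) 1).foldl
    (fun cc i =>
      cc.insert ((PySem.List.pyGet? ((PySem.List.pyGet? votes i).getD "").toList j).getD ' ')
        (cc.getD ((PySem.List.pyGet? ((PySem.List.pyGet? votes i).getD "").toList j).getD ' ') 0 + 1))
    PySem.Dict.empty

-- for j in range(n): ... for a in cands: counter[a].append(curr_counter[a])
def rankTeamsCounter (votes : List String) (m n : Nat) : PySem.Dict Char (List Int) :=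
  (PySem.List.pyRange 0 (n : Int) 1).foldl
    (fun counter j =>
      (rankTeamsCands votes).foldl
        (fun ctr a => ctr.insert a (ctr.getD a [] ++ [(rankTeamsCurr votes m j).getD a 0]))
        counter)
    PySem.Dict.empty

def rankTeams (votes : List String) : String :=
  let m : Nat := votes.length
  let n : Nat := (votes.headD "").toList.length
  -- sort_votes rows v + [k] are represented as pairs (k, v); x[:-1] is .2, x[-1] is .1
  let sortVotes : List (Char × List Int) := (rankTeamsCounter votes m n).items
  String.ofList
    ((PySem.List.sorted2 sortVotes (fun x => x.2.map (fun a => -a)) (fun x => x.1) false).map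
      (fun x => x.1))

-- ===== PORT B =====
def rankTeams_alt (votes : List String) : String :=
  let n : Nat := (votes.headD "").toList.length
  let teams : PySem.Set Char := PySem.Set.ofList
    (votes.flatMap (fun v =>
      (PySem.List.pyRange 0 (n : Int) 1).map (fun j => (PySem.List.pyGet? v.toList j).getD ' ')))
  let score : Char → List Int := fun t =>
    (PySem.List.pyRange 0 (n : Int) 1).map
      (fun j => -(votes.map (fun v => if (PySem.List.pyGet? v.toList j).getD ' ' = t then (1 : Int) else 0)).sum)
  String.ofList (PySem.List.sorted2 teams score (fun t => t) false)

-- ===== PRECONDITION & SPEC =====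
-- Pre_ excludes vote lists where some vote is shorter than the first (A raises IndexError there) and
-- those where a vote mentions a team only beyond position len(votes[0]) (A then lists such never-ranked
-- teams with all-zero counts while B omits them — both defensible on such malformed ballots).
def Pre_rankTeams (votes : List String) : Prop :=
  votes ≠ [] ∧
  (∀ v ∈ votes, (votes.headD "").toList.length ≤ v.toList.length) ∧
  ((votes.headD "").toList.length = 0 ∨
    votes.all (fun v => v.toList.all (fun c =>
      (votes.flatMap (fun v' =>
        (List.range ((votes.headD "").toList.length)).map
          (fun j => v'.toList.getD j ' '))).contains c)) = true)
instance (votes : List String) : Decidable (Pre_rankTeams votes) := by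
  unfold Pre_rankTeams; infer_instance

def pvWitness_rankTeams : List String := ["ABC", "ACB"]

def Spec_rankTeams (votes : List String) (out : String) : Prop := out = rankTeams_alt votes
instance (votes : List String) (out : String) : Decidable (Spec_rankTeams votes out) := by
  unfold Spec_rankTeams; infer_instance

-- ===== CLAIM (what is proved, stated in full; the proofs are below) =====
def Claim_equal_rankTeams : Prop :=
  ∀ (votes : List String), Dom_rankTeams votes → Pre_rankTeams votes →
    Spec_rankTeams votes (rankTeams votes)

-- ===== LEMMAS AND PROOFS =====

-- canonical data both ports are reduced to
def pvCol (votes : List String) (j : Nat) : List Char := votes.map (fun v => v.toList.getD j ' ')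

def pvCands (votes : List String) : PySem.Set Char :=
  PySem.Set.ofList (votes.flatMap (fun v => v.toList))

def pvColTeams (votes : List String) (n : Nat) : PySem.Set Char :=
  PySem.Set.ofList
    (votes.flatMap (fun v => (List.range n).map (fun j => v.toList.getD j ' ')))

def pvCnt (votes : List String) (n : Nat) (t : Char) : List Int :=
  (List.range n).map (fun j => ((pvCol votes j).count t : Int))

def pvKey (votes : List String) (n : Nat) (t : Char) : Lex (List Int × Char) :=
  toLex ((pvCnt votes n t).map (fun a => -a), t)

def pvScore (votes : List String) (n : Nat) (t : Char) : List Int :=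
  (PySem.List.pyRange 0 (n : Int) 1).map
    (fun j => -(votes.map (fun v => if (PySem.List.pyGet? v.toList j).getD ' ' = t then (1 : Int) else 0)).sum)

def pvColStep (votes : List String) (d : PySem.Dict Char (List Int)) (j : Nat) :
    PySem.Dict Char (List Int) :=
  (pvCands votes).foldl
    (fun ctr a => ctr.insert a (ctr.getD a [] ++ [((pvCol votes j).count a : Int)])) d

lemma pv_eq_of_not_lt (x y : List Int) (h1 : ¬ x < y) (h2 : ¬ y < x) : x = y :=
  le_antisymm (not_lt.mp h2) (not_lt.mp h1)

-- sorted2 (Python's tuple key) is sorted with the lexicographic pair key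
lemma pv_sorted2_lex {α : Type} (xs : List α) (k1 : α → List Int) (k2 : α → Char) :
    PySem.List.sorted2 xs k1 k2 false
      = PySem.List.sorted xs (fun x => toLex (k1 x, k2 x)) false := by
  have hb : (fun a b => decide (k1 a < k1 b) || (!decide (k1 b < k1 a) && decide (k2 a < k2 b)))
      = (fun a b => decide (toLex (k1 a, k2 a) < toLex (k1 b, k2 b))) := by
    funext a b
    by_cases h1 : k1 a < k1 b
    · simp [h1, Prod.Lex.lt_iff]
    · by_cases h2 : k1 b < k1 a
      · have hne : k1 a ≠ k1 b := ne_of_gt h2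
        simp [h1, h2, hne, Prod.Lex.lt_iff]
      · have he : k1 a = k1 b := pv_eq_of_not_lt _ _ h1 h2
        simp [he, Prod.Lex.lt_iff]
  have hfold : PySem.List.sorted2 xs k1 k2 false
      = List.foldl (fun acc x => PySem.List.insertBy
          (fun a b => decide (k1 a < k1 b) || (!decide (k1 b < k1 a) && decide (k2 a < k2 b))) x acc)
          [] xs := rfl
  rw [hfold, hb, ← PySem.List.sorted_eq_foldl_insertBy]

lemma pv_insertBy_map {α β : Type} (f : α → β) (bf : β → β → Bool) (x : α) (ys : List α) :
    PySem.List.insertBy bf (f x) (ys.map f)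
      = (PySem.List.insertBy (fun a b => bf (f a) (f b)) x ys).map f := by
  induction ys with
  | nil => simp [PySem.List.insertBy]
  | cons y ys ih =>
    simp only [List.map_cons, PySem.List.insertBy]
    by_cases h : bf (f x) (f y)
    · simp [h]
    · simp [h, ih]

lemma pv_sorted_map_eq {α β κ : Type} [LT κ] [DecidableLT κ]
    (xs : List α) (f : α → β) (key : β → κ) :
    PySem.List.sorted (xs.map f) key false
      = (PySem.List.sorted xs (fun a => key (f a)) false).map f := by
  rw [PySem.List.sorted_eq_foldl_insertBy, PySem.List.sorted_eq_foldl_insertBy]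
  have aux : ∀ (l : List α) (acc : List α),
      List.foldl (fun acc x => PySem.List.insertBy (fun a b => decide (key a < key b)) x acc)
        (acc.map f) (l.map f)
      = (List.foldl (fun acc x =>
            PySem.List.insertBy (fun a b => decide (key (f a) < key (f b))) x acc) acc l).map f := by
    intro l
    induction l with
    | nil => intro acc; simp
    | cons x l ih =>
      intro acc
      simp only [List.map_cons, List.foldl_cons]
      rw [pv_insertBy_map f (fun a b => decide (key a < key b)) x acc]
      exact ih _
  simpa using aux xs []

-- folding inserts over a Nodup key list: pointwise effect on getD
lemma pv_dict_fold_getD {ν : Type} (l : List Char) (hl : l.Nodup) (G : ν → Char → ν) (dfl : ν) :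
    ∀ (d : PySem.Dict Char ν) (t : Char),
      (l.foldl (fun d a => d.insert a (G (d.getD a dfl) a)) d).getD t dfl
        = if t ∈ l then G (d.getD t dfl) t else d.getD t dfl := by
  induction l with
  | nil => intro d t; simp
  | cons a l ih =>
    intro d t
    have hal : a ∉ l := (List.nodup_cons.mp hl).1
    have hln : l.Nodup := (List.nodup_cons.mp hl).2
    simp only [List.foldl_cons]
    rw [ih hln]
    by_cases htl : t ∈ l
    · have hta : t ≠ a := fun h => hal (h ▸ htl)
      simp [htl, PySem.Dict.getD_insert_of_ne _ _ _ hta, List.mem_cons]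
    · by_cases hta : t = a
      · subst hta
        simp [htl, PySem.Dict.getD_insert_self]
      · simp [htl, hta, PySem.Dict.getD_insert_of_ne _ _ _ hta, List.mem_cons]

lemma pv_cands_eq (votes : List String) : rankTeamsCands votes = pvCands votes := by
  unfold rankTeamsCands pvCands
  rw [PySem.Set.ofList_eq_foldl]
  have aux : ∀ (vs : List String) (s : PySem.Set Char),
      vs.foldl (fun s v => v.toList.foldl PySem.Set.add s) s
        = (vs.flatMap (fun v => v.toList)).foldl PySem.Set.add s := by
    intro vs
    induction vs with
    | nil => intro s; simp
    | cons v vs ih => intro s; simp [List.flatMap_cons, List.foldl_append, ih]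
  exact aux votes []

lemma pv_foldl_counter_chars (l : List Int) (g : Int → Char) :
    l.foldl (fun cc i => cc.insert (g i) (cc.getD (g i) 0 + 1)) PySem.Dict.empty
      = PySem.Dict.counter (l.map g) := by
  rw [← PySem.Dict.foldl_insert_getD_add_one_eq_counter, List.foldl_map]

lemma pv_curr_eq (votes : List String)
    (hlen : ∀ v ∈ votes, (votes.headD "").toList.length ≤ v.toList.length)
    (j : Nat) (hj : j < (votes.headD "").toList.length) :
    rankTeamsCurr votes votes.length (j : Int) = PySem.Dict.counter (pvCol votes j) := by
  unfold rankTeamsCurr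
  rw [pv_foldl_counter_chars
    (PySem.List.pyRange 0 (votes.length : Int) 1)
    (fun i => (PySem.List.pyGet? ((PySem.List.pyGet? votes i).getD "").toList (j : Int)).getD ' ')]
  congr 1
  rw [PySem.List.pyRange_zero_natCast, List.map_map]
  apply List.ext_getElem
  · simp [pvCol]
  · intro i hi hi'
    have him : i < votes.length := by simpa using hi
    have h1 : PySem.List.pyGet? votes ((i : Nat) : Int) = some votes[i] := by
      rw [PySem.List.pyGet?_natCast]
      exact List.getElem?_eq_getElem him
    have hjlen : j < votes[i].toList.length :=
      lt_of_lt_of_le hj (hlen votes[i] (List.getElem_mem him))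
    have h2 : PySem.List.pyGet? votes[i].toList ((j : Nat) : Int) = some votes[i].toList[j] := by
      rw [PySem.List.pyGet?_natCast]
      exact List.getElem?_eq_getElem hjlen
    simp [pvCol, h1, List.getD_eq_getElem?_getD, List.getElem?_eq_getElem hjlen]

lemma pv_counter_eq (votes : List String)
    (hlen : ∀ v ∈ votes, (votes.headD "").toList.length ≤ v.toList.length) :
    rankTeamsCounter votes votes.length ((votes.headD "").toList.length)
      = (List.range ((votes.headD "").toList.length)).foldl (pvColStep votes) PySem.Dict.empty := by
  unfold rankTeamsCounter
  rw [PySem.List.pyRange_zero_natCast, List.foldl_map]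
  apply PySem.List.foldl_congr_mem
  intro d j hj
  have hjn : j < (votes.headD "").toList.length := List.mem_range.mp hj
  rw [pv_cands_eq, pv_curr_eq votes hlen j hjn]
  unfold pvColStep
  simp only [PySem.Dict.getD_counter]

lemma pvColStep_getD (votes : List String) (d : PySem.Dict Char (List Int)) (j : Nat) (a : Char) :
    (pvColStep votes d j).getD a []
      = if a ∈ pvCands votes then d.getD a [] ++ [((pvCol votes j).count a : Int)]
        else d.getD a [] := by
  unfold pvColStep
  exact pv_dict_fold_getD (pvCands votes) (PySem.Set.nodup_ofList _)
    (fun v a => v ++ [((pvCol votes j).count a : Int)]) [] d a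

lemma pvColStep_keys (votes : List String) (d : PySem.Dict Char (List Int)) (j : Nat) :
    (pvColStep votes d j).keys = PySem.Set.update d.keys (pvCands votes) := by
  unfold pvColStep
  exact PySem.Dict.keys_foldl_insert _ _ _

lemma pvColStep_keys_nodup (votes : List String) (d : PySem.Dict Char (List Int)) (j : Nat)
    (h : d.keys.Nodup) : (pvColStep votes d j).keys.Nodup := by
  unfold pvColStep
  exact PySem.Dict.nodup_keys_foldl_insert _ _ _ h

lemma pv_counter_inv (votes : List String) (k : Nat) :
    (∀ a ∈ pvCands votes,
        ((List.range k).foldl (pvColStep votes) PySem.Dict.empty).getD a []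
          = (List.range k).map (fun j => ((pvCol votes j).count a : Int)))
    ∧ ((List.range k).foldl (pvColStep votes) PySem.Dict.empty).keys.Nodup
    ∧ (∀ x, x ∈ ((List.range k).foldl (pvColStep votes) PySem.Dict.empty).keys
          ↔ x ∈ pvCands votes ∧ k ≠ 0) := by
  induction k with
  | zero => simp [PySem.Dict.keys_empty]
  | succ k ih =>
    obtain ⟨ihg, ihn, ihm⟩ := ih
    have hstep : (List.range (k + 1)).foldl (pvColStep votes) PySem.Dict.empty
        = pvColStep votes ((List.range k).foldl (pvColStep votes) PySem.Dict.empty) k := by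
      rw [List.range_succ, List.foldl_append, List.foldl_cons, List.foldl_nil]
    rw [hstep]
    refine ⟨?_, pvColStep_keys_nodup _ _ _ ihn, ?_⟩
    · intro a ha
      rw [pvColStep_getD, if_pos ha, ihg a ha, List.range_succ, List.map_append]
      simp
    · intro x
      rw [pvColStep_keys, PySem.Set.mem_update, ihm x]
      constructor
      · rintro (⟨h, _⟩ | h) <;> exact ⟨h, Nat.succ_ne_zero k⟩
      · rintro ⟨h, _⟩; exact Or.inr h

lemma pv_key_injective :
    Function.Injective
      (fun x : Char × List Int => toLex (x.2.map (fun a : Int => -a), x.1)) := by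
  intro x y h
  have h' : (x.2.map (fun a : Int => -a), x.1) = (y.2.map (fun a : Int => -a), y.1) :=
    toLex.injective h
  have h1 : x.2.map (fun a : Int => -a) = y.2.map (fun a : Int => -a) := congrArg Prod.fst h'
  have h2 : x.1 = y.1 := congrArg Prod.snd h'
  have h3 : x.2 = y.2 := List.map_injective_iff.mpr neg_injective h1
  exact Prod.ext h2 h3

set_option maxHeartbeats 1600000 in
lemma pv_A_eq (votes : List String) (hpre : Pre_rankTeams votes) :
    rankTeams votes
      = String.ofList (PySem.List.sorted
          (pvColTeams votes ((votes.headD "").toList.length))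
          (pvKey votes ((votes.headD "").toList.length)) false) := by
  obtain ⟨_hne, hlen, hcols⟩ := hpre
  set n := (votes.headD "").toList.length with hn
  obtain ⟨hg, hnd, hmem⟩ := pv_counter_inv votes n
  have hndT : (pvColTeams votes n).Nodup := PySem.Set.nodup_ofList _
  have hitems : ((List.range n).foldl (pvColStep votes) PySem.Dict.empty).items
      = ((List.range n).foldl (pvColStep votes) PySem.Dict.empty).keys.map
          (fun k => (k, pvCnt votes n k)) := by
    rw [PySem.Dict.items_eq_map_keys _ hnd []]
    apply List.map_congr_left
    intro a ha
    have hga := hg a ((hmem a).mp ha).1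
    simp [hga, pvCnt]
  have hperm : ((List.range n).foldl (pvColStep votes) PySem.Dict.empty).items.Perm
      ((pvColTeams votes n).map (fun t => (t, pvCnt votes n t))) := by
    rw [hitems]
    apply List.Perm.map
    rw [List.perm_ext_iff_of_nodup hnd hndT]
    intro a
    rw [hmem a]
    constructor
    · rintro ⟨h, hn0⟩
      rcases hcols with h0 | hsub
      · exact absurd h0 hn0
      · have hsub' : ∀ v ∈ votes, ∀ c ∈ v.toList,
            c ∈ votes.flatMap (fun v' =>
              (List.range n).map (fun j => v'.toList.getD j ' ')) := by
          simpa using hsub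
        have h' : a ∈ votes.flatMap (fun v => v.toList) := (PySem.Set.mem_ofList _ _).mp h
        obtain ⟨v, hv, hav⟩ := List.mem_flatMap.mp h'
        exact (PySem.Set.mem_ofList _ _).mpr (hsub' v hv a hav)
    · intro h
      have h' := (PySem.Set.mem_ofList _ _).mp h
      obtain ⟨v, hv, hmem2⟩ := List.mem_flatMap.mp h'
      obtain ⟨j, hj, hgj⟩ := List.mem_map.mp hmem2
      have hjn : j < n := List.mem_range.mp hj
      have hjv : j < v.toList.length := lt_of_lt_of_le hjn (hlen v hv)
      refine ⟨?_, by omega⟩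
      apply (PySem.Set.mem_ofList _ _).mpr
      apply List.mem_flatMap.mpr
      refine ⟨v, hv, ?_⟩
      rw [← hgj, List.getD_eq_getElem?_getD, List.getElem?_eq_getElem hjv]
      simp [List.getElem_mem hjv]
  calc rankTeams votes
      = String.ofList ((PySem.List.sorted2
            ((List.range n).foldl (pvColStep votes) PySem.Dict.empty).items
            (fun x => x.2.map (fun a => -a)) (fun x => x.1) false).map (fun x => x.1)) := by
        show String.ofList ((PySem.List.sorted2 (rankTeamsCounter votes votes.length n).items
            (fun x => x.2.map (fun a => -a)) (fun x => x.1) false).map (fun x => x.1)) = _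
        rw [pv_counter_eq votes hlen]
    _ = String.ofList ((PySem.List.sorted
            ((List.range n).foldl (pvColStep votes) PySem.Dict.empty).items
            (fun x : Char × List Int => toLex (x.2.map (fun a => -a), x.1)) false).map
              (fun x => x.1)) :=
        congrArg (fun l : List (Char × List Int) => String.ofList (l.map (fun x => x.1)))
          (pv_sorted2_lex _ _ _)
    _ = String.ofList ((PySem.List.sorted ((pvColTeams votes n).map (fun t => (t, pvCnt votes n t)))
            (fun x : Char × List Int => toLex (x.2.map (fun a => -a), x.1)) false).map
              (fun x => x.1)) :=
        congrArg (fun l : List (Char × List Int) => String.ofList (l.map (fun x => x.1)))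
          (PySem.List.sorted_eq_sorted_of_perm _ _ _ pv_key_injective hperm)
    _ = String.ofList (((PySem.List.sorted (pvColTeams votes n)
            (fun t => toLex ((pvCnt votes n t).map (fun a => -a), t)) false).map
              (fun t => (t, pvCnt votes n t))).map (fun x : Char × List Int => x.1)) :=
        congrArg (fun l : List (Char × List Int) => String.ofList (l.map (fun x => x.1)))
          (pv_sorted_map_eq (pvColTeams votes n) (fun t => (t, pvCnt votes n t)) _)
    _ = String.ofList (PySem.List.sorted (pvColTeams votes n) (pvKey votes n) false) := by
        rw [List.map_map]
        have hc : ((fun x : Char × List Int => x.1) ∘ (fun t : Char => (t, pvCnt votes n t)))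
            = id := rfl
        rw [hc, List.map_id]
        have hk : (fun t : Char => toLex ((pvCnt votes n t).map (fun a => -a), t))
            = pvKey votes n := rfl
        rw [hk]

lemma pv_score_eq (votes : List String) (n : Nat) (t : Char) :
    pvScore votes n t = (pvCnt votes n t).map (fun a => -a) := by
  unfold pvScore
  rw [PySem.List.pyRange_zero_natCast, List.map_map]
  unfold pvCnt
  rw [List.map_map]
  apply List.map_congr_left
  intro j _hj
  show -(votes.map
      (fun v => if (PySem.List.pyGet? v.toList ((j : Nat) : Int)).getD ' ' = t then (1 : Int) else 0)).sum
    = -(((pvCol votes j).count t : Int))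
  congr 1
  have h1 : (fun v : String =>
        if (PySem.List.pyGet? v.toList ((j : Nat) : Int)).getD ' ' = t then (1 : Int) else 0)
      = (fun v : String => if (v.toList.getD j ' ' == t) = true then (1 : Int) else 0) := by
    funext v
    rw [PySem.List.pyGet?_natCast]
    simp [List.getD_eq_getElem?_getD]
  rw [h1, PySem.List.sum_map_ite_one_zero]
  unfold pvCol
  rw [List.count_eq_countP, List.countP_map]
  rfl

lemma pv_B_teams (votes : List String) (n : Nat) :
    PySem.Set.ofList
        (votes.flatMap (fun v =>
          (PySem.List.pyRange 0 (n : Int) 1).map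
            (fun j => (PySem.List.pyGet? v.toList j).getD ' ')))
      = pvColTeams votes n := by
  unfold pvColTeams
  congr 1
  have hf : (fun v : String =>
        (PySem.List.pyRange 0 (n : Int) 1).map
          (fun j => (PySem.List.pyGet? v.toList j).getD ' '))
      = (fun v : String => (List.range n).map (fun j => v.toList.getD j ' ')) := by
    funext v
    rw [PySem.List.pyRange_zero_natCast, List.map_map]
    apply List.map_congr_left
    intro j _hj
    simp [PySem.List.pyGet?_natCast, List.getD_eq_getElem?_getD]
  rw [hf]

lemma pv_B_eq (votes : List String) :
    rankTeams_alt votes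
      = String.ofList (PySem.List.sorted
          (pvColTeams votes ((votes.headD "").toList.length))
          (pvKey votes ((votes.headD "").toList.length)) false) := by
  have hkey : (fun t : Char => toLex (pvScore votes ((votes.headD "").toList.length) t, t))
      = pvKey votes ((votes.headD "").toList.length) := by
    funext t
    rw [pv_score_eq]
    rfl
  calc rankTeams_alt votes
      = String.ofList (PySem.List.sorted2
          (PySem.Set.ofList
            (votes.flatMap (fun v =>
              (PySem.List.pyRange 0 (((votes.headD "").toList.length : Nat) : Int) 1).map
                (fun j => (PySem.List.pyGet? v.toList j).getD ' '))))
          (pvScore votes ((votes.headD "").toList.length)) (fun t => t) false) := rfl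
    _ = String.ofList (PySem.List.sorted2
          (pvColTeams votes ((votes.headD "").toList.length))
          (pvScore votes ((votes.headD "").toList.length)) (fun t => t) false) :=
        congrArg (fun ts : PySem.Set Char => String.ofList (PySem.List.sorted2 ts
          (pvScore votes ((votes.headD "").toList.length)) (fun t => t) false))
          (pv_B_teams votes ((votes.headD "").toList.length))
    _ = String.ofList (PySem.List.sorted
          (pvColTeams votes ((votes.headD "").toList.length))
          (fun t : Char => toLex (pvScore votes ((votes.headD "").toList.length) t, t)) false) :=
        congrArg String.ofList (pv_sorted2_lex _ _ _)
    _ = String.ofList (PySem.List.sorted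
          (pvColTeams votes ((votes.headD "").toList.length))
          (pvKey votes ((votes.headD "").toList.length)) false) := by
        rw [hkey]

-- ===== VERDICT (by name: the statement is the Claim_ definition above) =====
theorem rankTeams_spec : Claim_equal_rankTeams := by
  intro votes _hdom hpre
  unfold Spec_rankTeams
  rw [pv_A_eq votes hpre, pv_B_eq votes]
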